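-- pv_equiv track=rewrite | github.com/zxy1123/pythonProcessViewer | bfs.py | search
-- ===== SOURCE A (Python) =====
-- def search(g,start=None):
-- 	num={}
-- 	gens_group=[]
-- 	i=1
-- 	queqe=[]
-- 	for v in g.keys():
-- 		num[v]=0
-- 	finish = False
-- 	while not finish:
-- 		finish = True
-- 		if start != None:
-- 			search_sub_graph(start,i,num,gens_group,g,queqe)
-- 		for v in num.keys():
-- 			search_sub_graph(v,i,num,gens_group,g,queqe)
-- 	return (gens_group)
--
-- def search_sub_graph(v,i,num,gens_group,g,queqe):
-- 	if num[v]==0: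
-- 				num[v]=i
-- 				i+=1
-- 				gen=0
-- 				gens={}
-- 				finish=False
-- 				queqe.append((v,gen))
-- 				gens[v]=gen
-- 				while len(queqe)>0:
-- 					node=queqe[0]
-- 					del queqe[0]
-- 					vs=g[node[0]]
-- 					for u in vs:
-- 						if num[u]==0:
-- 							num[u]=i
-- 							i=+1
-- 							gens[u]=node[1]+1
-- 							queqe.append((u,node[1]+1))
-- 				gens_group.append(gens)
-- ===== SOURCE B (Python) =====
-- def search(g, start=None):
--     groups = []
--     visited = set()
--     roots = [] if start is None else [start]
--     roots.extend(g.keys())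
--     for r in roots:
--         if r in visited:
--             continue
--         visited.add(r)
--         gens = {r: 0}
--         frontier = [r]
--         level = 0
--         while frontier:
--             next_frontier = []
--             for node in frontier:
--                 for u in g[node]:
--                     if u not in visited:
--                         visited.add(u)
--                         gens[u] = level + 1
--                         next_frontier.append(u)
--             frontier = next_frontier
--             level += 1
--         groups.append(gens)
--     return groups
-- ===== Notes on version B (the rewrite author's own statement) =====
-- stated objective: alternative
-- what changed: Replaces the single mutable queue of node/generation pairs popped from the front and the zero-or-marked numbering dict by a level-synchronous BFS: a visited set and per-level frontier lists rebuilt wave by wave, the level kept in one counter instead of a tag on every queue entry.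
import Mathlib
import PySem

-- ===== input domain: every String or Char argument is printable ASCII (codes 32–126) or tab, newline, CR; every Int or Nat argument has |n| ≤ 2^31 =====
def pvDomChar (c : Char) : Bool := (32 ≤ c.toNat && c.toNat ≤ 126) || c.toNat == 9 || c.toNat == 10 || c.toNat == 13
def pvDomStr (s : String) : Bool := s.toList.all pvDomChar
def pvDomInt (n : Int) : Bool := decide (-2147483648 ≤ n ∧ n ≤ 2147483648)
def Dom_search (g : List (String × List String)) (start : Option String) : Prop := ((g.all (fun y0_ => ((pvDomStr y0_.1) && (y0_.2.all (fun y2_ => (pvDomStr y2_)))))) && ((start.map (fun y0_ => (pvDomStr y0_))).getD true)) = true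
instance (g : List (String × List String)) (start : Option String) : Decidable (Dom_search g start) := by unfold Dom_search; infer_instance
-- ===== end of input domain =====

-- B replaces A's single mutable queue of node/generation pairs popped from the front
-- and the numbering dict by a level-synchronous BFS: a visited set and per-level frontier
-- lists rebuilt wave by wave, with one level counter per component.

abbrev Dct := PySem.Dict String Int
abbrev Gr := PySem.Dict String (List String)

-- ===== PORT A =====
-- body of 'for u in vs' inside the inner while loop of search_sub_graph; state = i, num, gens, queqe
-- ('i=+1' in A sets i to 1 — kept verbatim)
def aInner (lvl1 : Int) (st : Int × Dct × Dct × List (String × Int)) (u : String) :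
    Int × Dct × Dct × List (String × Int) :=
  if st.2.1.getD u 0 == 0 then
    (1, st.2.1.insert u st.1, st.2.2.1.insert u lvl1, st.2.2.2 ++ [(u, lvl1)])
  else st

-- the 'while len(queqe)>0' loop of search_sub_graph; the fuel only makes the recursion total
-- (the proofs below track a measure showing the fuel passed by 'search' suffices); vs =
-- g[node[0]] is looked up with getD [] — Python raises KeyError exactly where Pre_search fails
def aLoop (g : Gr) (fuel : Nat) (i : Int) (num gens : Dct) (q : List (String × Int)) :
    Int × Dct × Dct :=
  match fuel, q with
  | 0, _ => (i, num, gens)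
  | _ + 1, [] => (i, num, gens)
  | fuel + 1, node :: rest =>
    let st := (g.getD node.1 []).foldl (aInner (node.2 + 1)) (i, num, gens, rest)
    aLoop g fuel st.1 st.2.1 st.2.2.1 st.2.2.2

-- search_sub_graph: num[v] is read with getD 0 (Python raises KeyError iff v ∉ num, i.e. outside
-- Pre_search); the queue starts [(v,0)] (A's shared queue is always empty between calls)
def aSub (g : Gr) (fuel : Nat) (v : String) (i : Int) (num : Dct) (gg : List Dct) :
    Dct × List Dct :=
  if num.getD v 0 == 0 then
    let r := aLoop g fuel (i + 1) (num.insert v i) ((PySem.Dict.empty : Dct).insert v 0) [(v, 0)]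
    (r.2.1, gg ++ [r.2.2])
  else (num, gg)

-- A's 'while not finish' runs its body exactly once (finish is set True at the top and never
-- reset), so the body appears once; 'for v in num.keys()' iterates the keys num had at entry
-- (under Pre_search num's key set never changes; outside it Python has already raised)
def search (g : List (String × List String)) (start : Option String) :
    List (List (String × Int)) :=
  let d := PySem.Dict.ofList g
  let num0 := d.keys.foldl (fun (n : Dct) v => n.insert v 0) PySem.Dict.empty
  let fuel := (g.map (fun p => p.2.length)).sum + 2
  let p0 : Dct × List Dct :=
    match start with
    | some s => aSub d fuel s 1 num0 []
    | none => (num0, [])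
  let p1 := num0.keys.foldl (fun (p : Dct × List Dct) v => aSub d fuel v 1 p.1 p.2) p0
  p1.2.map (fun gens => gens.items)

-- ===== PORT B =====
-- body of 'for u in g[node]' in Source B; state = (visited, gens, next_frontier)
def bInner (lvl : Int) (st : PySem.Set String × Dct × List String) (u : String) :
    PySem.Set String × Dct × List String :=
  if PySem.Set.contains st.1 u then st
  else (PySem.Set.add st.1 u, st.2.1.insert u (lvl + 1), st.2.2 ++ [u])

-- 'for node in frontier' body: g[node] via getD [] (KeyError outside Pre_search, as in A's port)
def bNode (g : Gr) (lvl : Int) (st : PySem.Set String × Dct × List String) (v : String) :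
    PySem.Set String × Dct × List String :=
  (g.getD v []).foldl (bInner lvl) st

-- 'while frontier' of Source B; the fuel only makes the recursion total (it suffices, see above)
def bLoop (g : Gr) (fuel : Nat) (frontier : List String) (lvl : Int)
    (vis : PySem.Set String) (gens : Dct) : PySem.Set String × Dct :=
  match fuel, frontier with
  | 0, _ => (vis, gens)
  | _ + 1, [] => (vis, gens)
  | fuel + 1, f =>
    let st := f.foldl (bNode g lvl) (vis, gens, ([] : List String))
    bLoop g fuel st.2.2 (lvl + 1) st.1 st.2.1

-- body of 'for r in roots' in Source B
def bRoot (g : Gr) (fuel : Nat) (p : PySem.Set String × List Dct) (r : String) :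
    PySem.Set String × List Dct :=
  if PySem.Set.contains p.1 r then p
  else
    let res := bLoop g fuel [r] 0 (PySem.Set.add p.1 r) ((PySem.Dict.empty : Dct).insert r 0)
    (res.1, p.2 ++ [res.2])

def search_alt (g : List (String × List String)) (start : Option String) :
    List (List (String × Int)) :=
  let d := PySem.Dict.ofList g
  let roots := (match start with | none => ([] : List String) | some s => [s]) ++ d.keys
  let fuel := (g.map (fun p => p.2.length)).sum + 2
  let p := roots.foldl (bRoot d fuel) (PySem.Set.empty, ([] : List Dct))
  p.2.map (fun gens => gens.items)

-- ===== PRECONDITION & SPEC =====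
-- Pre_search = exactly the inputs on which Python A returns normally: A raises KeyError at
-- num[start] if the given start is not a key of g, and at num[u] for any neighbour u (in any
-- adjacency list of the dict) that is not a key of g.  (Python B raises KeyError on exactly
-- the same inputs, at its own g lookups.)
def Pre_search (g : List (String × List String)) (start : Option String) : Prop :=
  ((start.map (fun s => (PySem.Dict.ofList g).contains s)).getD true = true) ∧
  ((PySem.Dict.ofList g).values.all
      (fun vs => vs.all (fun u => (PySem.Dict.ofList g).contains u)) = true)
instance (g : List (String × List String)) (start : Option String) :
    Decidable (Pre_search g start) := by unfold Pre_search; infer_instance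

def pvWitness_search : (List (String × List String)) × Option String :=
  ([("a", ["b"]), ("b", ["a", "b"]), ("c", [])], some "b")

def Spec_search (g : List (String × List String)) (start : Option String)
    (out : List (List (String × Int))) : Prop := out = search_alt g start
instance (g : List (String × List String)) (start : Option String)
    (out : List (List (String × Int))) : Decidable (Spec_search g start out) := by
  unfold Spec_search; infer_instance

-- ===== CLAIM (what is proved, stated in full; the proofs are below) =====
def Claim_equal_search : Prop := ∀ (g : List (String × List String)) (start : Option String),
  Dom_search g start → Pre_search g start → Spec_search g start (search g start)

-- ===== LEMMAS AND PROOFS =====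

-- the universe of ever-enqueued nodes (all neighbours occurring in g), deduplicated
def uL (g : List (String × List String)) : List String := ((g.map fun p => p.2).flatten).dedup

-- number of universe nodes still unmarked in num: the termination measure of both loops
def Zc (g : List (String × List String)) (num : Dct) : Nat :=
  ((uL g).filter (fun u => num.getD u 0 == 0)).length

-- the simulation relation between A's numbering dict and B's visited set
def NV (num : Dct) (vis : PySem.Set String) : Prop :=
  ∀ u, num.getD u 0 = 0 ↔ u ∉ vis

lemma pv_contains_iff (s : PySem.Set String) (x : String) :
    PySem.Set.contains s x = true ↔ x ∈ s := List.contains_iff_mem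

lemma pv_ofList_foldl (g : List (String × List String)) :
    PySem.Dict.ofList g
      = g.foldl (fun d p => d.insert p.1 p.2) (PySem.Dict.empty : Gr) := rfl

lemma pv_foldl_insert_mem (l : List (String × List String)) :
    ∀ (d : Gr) (k : String) (vs : List String),
      (l.foldl (fun d p => d.insert p.1 p.2) d).get? k = some vs →
      (k, vs) ∈ l ∨ d.get? k = some vs := by
  induction l with
  | nil => intro d k vs h; exact Or.inr h
  | cons p t ih =>
    intro d k vs h
    rcases ih _ _ _ h with h1 | h2
    · exact Or.inl (List.mem_cons_of_mem _ h1)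
    · rw [PySem.Dict.get?_insert] at h2
      split at h2
      · rename_i hk
        obtain rfl : p.2 = vs := Option.some.inj h2
        exact Or.inl (by rw [hk]; exact List.mem_cons_self)
      · exact Or.inr h2

lemma pv_ofList_mem (g : List (String × List String)) (k : String) (vs : List String)
    (h : (PySem.Dict.ofList g).get? k = some vs) : (k, vs) ∈ g := by
  rw [pv_ofList_foldl] at h
  rcases pv_foldl_insert_mem g _ _ _ h with h1 | h2
  · exact h1
  · rw [PySem.Dict.get?_empty] at h2; cases h2

lemma pv_mem_uL (g : List (String × List String)) (v u : String)
    (hu : u ∈ (PySem.Dict.ofList g).getD v []) : u ∈ uL g := by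
  rw [PySem.Dict.getD_eq_get?_getD] at hu
  cases h : (PySem.Dict.ofList g).get? v with
  | none => rw [h] at hu; simp at hu
  | some vs =>
    rw [h] at hu; simp only [Option.getD_some] at hu
    have hm := pv_ofList_mem g v vs h
    exact List.mem_dedup.mpr (List.mem_flatten.mpr
      ⟨vs, List.mem_map.mpr ⟨(v, vs), hm, rfl⟩, hu⟩)

lemma pv_uL_le (g : List (String × List String)) :
    (uL g).length ≤ (g.map (fun p => p.2.length)).sum := by
  have h1 : (uL g).length ≤ ((g.map fun p => p.2).flatten).length :=
    (List.dedup_sublist _).length_le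
  rw [List.length_flatten, List.map_map] at h1
  exact h1

lemma pv_Zc_le (g : List (String × List String)) (num : Dct) :
    Zc g num ≤ (uL g).length := List.length_filter_le _ _

lemma pv_filter_mark (U : List String) :
    ∀ (p q : String → Bool) (u : String), U.Nodup → u ∈ U → p u = true → q u = false →
      (∀ x, x ≠ u → q x = p x) → (U.filter q).length + 1 ≤ (U.filter p).length := by
  induction U with
  | nil => intro p q u _ hu; cases hu
  | cons x t ih =>
    intro p q u hnd hu hp hq hqp
    obtain ⟨hx, ht⟩ := List.nodup_cons.mp hnd
    rcases List.mem_cons.mp hu with rfl | hut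
    · have : t.filter q = t.filter p :=
        List.filter_congr (fun y hy => hqp y (fun hyx => hx (hyx ▸ hy)))
      simp [hp, hq, this]
    · have hxu : x ≠ u := fun h => hx (h ▸ hut)
      have hqx : q x = p x := hqp x hxu
      cases hpx : p x <;>
        simp only [List.filter_cons, hqx, hpx, if_pos, if_neg,
          Bool.false_eq_true, not_false_eq_true, List.length_cons] <;>
      · have := ih p q u ht hut hp hq hqp
        omega

lemma pv_Zc_mark (g : List (String × List String)) (num : Dct) (u : String) (i : Int)
    (hu : u ∈ uL g) (h0 : (num.getD u 0 == 0) = true) (hi : i ≠ 0) :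
    Zc g (num.insert u i) + 1 ≤ Zc g num := by
  unfold Zc
  apply pv_filter_mark (uL g) _ _ u (List.nodup_dedup _) hu h0
  · simp [hi]
  · intro x hx
    simp [PySem.Dict.getD_insert, hx]

lemma pv_NV_mark (num : Dct) (vis : PySem.Set String) (u : String) (i : Int)
    (hi : i ≠ 0) (h : NV num vis) : NV (num.insert u i) (PySem.Set.add vis u) := by
  intro x
  rw [PySem.Dict.getD_insert]
  by_cases hx : x = u
  · subst hx
    rw [if_pos rfl]
    constructor
    · intro h0; exact absurd h0 hi
    · intro hmem; exact absurd ((PySem.Set.mem_add vis x x).mpr (Or.inr rfl)) hmem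
  · rw [if_neg hx, h x]
    constructor
    · intro hx2 hmem
      rcases (PySem.Set.mem_add vis u x).mp hmem with hm | rfl
      · exact hx2 hm
      · exact hx rfl
    · intro hx2 hm
      exact hx2 ((PySem.Set.mem_add vis u x).mpr (Or.inl hm))

lemma pv_L0 (g : List (String × List String)) (vs : List String) (lvl : Int) :
    ∀ (i : Int) (num gens : Dct) (vis : PySem.Set String) (nf : List String)
      (q0 : List (String × Int)), i ≠ 0 → NV num vis → (∀ u ∈ vs, u ∈ uL g) →
    ∃ Δ i' num',
      vs.foldl (aInner (lvl + 1)) (i, num, gens, q0)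
        = (i', num', (vs.foldl (bInner lvl) (vis, gens, nf)).2.1,
           q0 ++ Δ.map (fun u => (u, lvl + 1))) ∧
      (vs.foldl (bInner lvl) (vis, gens, nf)).2.2 = nf ++ Δ ∧
      i' ≠ 0 ∧ NV num' (vs.foldl (bInner lvl) (vis, gens, nf)).1 ∧
      Zc g num' + Δ.length ≤ Zc g num := by
  induction vs with
  | nil =>
    intro i num gens vis nf q0 hi hNV _
    exact ⟨[], i, num, by simp, by simp, hi, hNV, by simp⟩
  | cons u vs ih =>
    intro i num gens vis nf q0 hi hNV hvs
    simp only [List.foldl_cons]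
    by_cases hm : u ∈ vis
    · have hga : (num.getD u 0 == 0) = false := by
        rw [beq_eq_false_iff_ne]
        intro h0
        exact (hNV u).mp h0 hm
      have hgb : PySem.Set.contains vis u = true := (pv_contains_iff _ _).mpr hm
      simp only [aInner, bInner, hga, hgb, if_neg, Bool.false_eq_true, not_false_eq_true,
        if_true]
      exact ih i num gens vis nf q0 hi hNV (fun x hx => hvs x (List.mem_cons_of_mem _ hx))
    · have h0 : num.getD u 0 = 0 := (hNV u).mpr hm
      have hga : (num.getD u 0 == 0) = true := by rw [beq_iff_eq]; exact h0
      have hgb : PySem.Set.contains vis u = false := by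
        rw [Bool.eq_false_iff]
        intro hc
        exact hm ((pv_contains_iff vis u).mp hc)
      simp only [aInner, bInner, hga, hgb, if_true, if_false, Bool.false_eq_true]
      obtain ⟨Δ, i', num', hA, hB, hi', hNV', hZ⟩ :=
        ih 1 (num.insert u i) (gens.insert u (lvl + 1)) (PySem.Set.add vis u)
          (nf ++ [u]) (q0 ++ [(u, lvl + 1)]) one_ne_zero
          (pv_NV_mark num vis u i hi hNV)
          (fun x hx => hvs x (List.mem_cons_of_mem _ hx))
      refine ⟨u :: Δ, i', num', ?_, ?_, hi', hNV', ?_⟩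
      · rw [hA]
        simp
      · rw [hB]
        simp
      · have hmark := pv_Zc_mark g num u i (hvs u List.mem_cons_self) hga hi
        simp only [List.length_cons]
        omega

lemma pv_L1 (g : List (String × List String)) (f : List String) (lvl : Int) :
    ∀ (i : Int) (num gens : Dct) (vis : PySem.Set String) (nf : List String)
      (f2 : List String) (fuelA : Nat), i ≠ 0 → NV num vis → f.length ≤ fuelA →
    ∃ Δ i' num',
      aLoop (PySem.Dict.ofList g) fuelA i num gens
          (f.map (fun v => (v, lvl)) ++ f2.map (fun v => (v, lvl + 1)))
        = aLoop (PySem.Dict.ofList g) (fuelA - f.length) i' num'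
            (f.foldl (bNode (PySem.Dict.ofList g) lvl) (vis, gens, nf)).2.1
            ((f2 ++ Δ).map (fun v => (v, lvl + 1))) ∧
      (f.foldl (bNode (PySem.Dict.ofList g) lvl) (vis, gens, nf)).2.2 = nf ++ Δ ∧
      i' ≠ 0 ∧ NV num' (f.foldl (bNode (PySem.Dict.ofList g) lvl) (vis, gens, nf)).1 ∧
      Zc g num' + Δ.length ≤ Zc g num := by
  induction f with
  | nil =>
    intro i num gens vis nf f2 fuelA hi hNV _
    exact ⟨[], i, num, by simp, by simp, hi, hNV, by simp⟩
  | cons v f ih =>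
    intro i num gens vis nf f2 fuelA hi hNV hlen
    cases fuelA with
    | zero => simp at hlen
    | succ fa =>
      simp only [List.map_cons, List.cons_append, List.foldl_cons, bNode]
      simp only [aLoop]
      obtain ⟨Δ₀, i₀, num₀, hA0, hB0, hi0, hNV0, hZ0⟩ := pv_L0 g
        ((PySem.Dict.ofList g).getD v []) lvl i num gens vis nf
        (f.map (fun v => (v, lvl)) ++ f2.map (fun v => (v, lvl + 1))) hi hNV
        (fun u hu => pv_mem_uL g v u hu)
      obtain ⟨Δ₁, i', num', hA1, hB1, hi1, hNV1, hZ1⟩ := ih i₀ num₀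
        ((((PySem.Dict.ofList g).getD v []).foldl (bInner lvl) (vis, gens, nf)).2.1)
        ((((PySem.Dict.ofList g).getD v []).foldl (bInner lvl) (vis, gens, nf)).1)
        ((((PySem.Dict.ofList g).getD v []).foldl (bInner lvl) (vis, gens, nf)).2.2)
        (f2 ++ Δ₀) fa hi0 hNV0 (by simpa using Nat.le_of_succ_le_succ hlen)
      refine ⟨Δ₀ ++ Δ₁, i', num', ?_, ?_, hi1, ?_, ?_⟩
      · rw [hA0]
        rw [show (f.map (fun v => (v, lvl)) ++ f2.map (fun v => (v, lvl + 1)))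
              ++ Δ₀.map (fun u => (u, lvl + 1))
            = f.map (fun v => (v, lvl)) ++ (f2 ++ Δ₀).map (fun v => (v, lvl + 1)) by
          simp [List.append_assoc]]
        rw [hA1]
        simp [Nat.succ_sub_succ, List.append_assoc]
      · rw [hB1, hB0]
        simp [List.append_assoc]
      · exact hNV1
      · simp only [List.length_append]
        omega

lemma pv_L2 (g : List (String × List String)) (fuelB : Nat) :
    ∀ (f : List String) (lvl : Int) (i : Int) (num gens : Dct) (vis : PySem.Set String)
      (fuelA : Nat), i ≠ 0 → NV num vis → f.length + Zc g num ≤ fuelA →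
      Zc g num + 1 ≤ fuelB →
    (aLoop (PySem.Dict.ofList g) fuelA i num gens (f.map (fun v => (v, lvl)))).2.2
        = (bLoop (PySem.Dict.ofList g) fuelB f lvl vis gens).2 ∧
      NV (aLoop (PySem.Dict.ofList g) fuelA i num gens (f.map (fun v => (v, lvl)))).2.1
        (bLoop (PySem.Dict.ofList g) fuelB f lvl vis gens).1 := by
  induction fuelB with
  | zero => intro f lvl i num gens vis fuelA hi hNV hfa hfb; omega
  | succ fb ih =>
    intro f lvl i num gens vis fuelA hi hNV hfa hfb
    cases f with
    | nil =>
      cases fuelA <;> simp only [aLoop, bLoop, List.map_nil] <;> exact ⟨trivial, hNV⟩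
    | cons v f' =>
      have hlen : (v :: f').length ≤ fuelA := by omega
      obtain ⟨Δ, i', num', hA1, hB1, hi1, hNV1, hZ1⟩ :=
        pv_L1 g (v :: f') lvl i num gens vis [] [] fuelA hi hNV hlen
      simp only [List.map_nil, List.append_nil, List.nil_append] at hA1 hB1
      simp only [bLoop]
      rw [hA1, hB1]
      by_cases hD : Δ = []
      · subst hD
        cases hfA : fuelA - (v :: f').length <;> cases fb <;>
          simp only [aLoop, bLoop, List.map_nil] <;> exact ⟨trivial, hNV1⟩
      · have hpos : 0 < Δ.length := List.length_pos_iff.mpr hD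
        exact ih Δ (lvl + 1) i' num'
          (((v :: f').foldl (bNode (PySem.Dict.ofList g) lvl) (vis, gens, [])).2.1)
          (((v :: f').foldl (bNode (PySem.Dict.ofList g) lvl) (vis, gens, [])).1)
          (fuelA - (v :: f').length) hi1 hNV1 (by omega) (by omega)

lemma pv_L3 (g : List (String × List String)) (roots : List String) :
    ∀ (num : Dct) (vis : PySem.Set String) (gg : List Dct), NV num vis →
    (roots.foldl
        (fun (p : Dct × List Dct) v =>
          aSub (PySem.Dict.ofList g) ((g.map (fun p => p.2.length)).sum + 2) v 1 p.1 p.2)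
        (num, gg)).2
      = (roots.foldl (bRoot (PySem.Dict.ofList g) ((g.map (fun p => p.2.length)).sum + 2))
          (vis, gg)).2 ∧
    NV (roots.foldl
        (fun (p : Dct × List Dct) v =>
          aSub (PySem.Dict.ofList g) ((g.map (fun p => p.2.length)).sum + 2) v 1 p.1 p.2)
        (num, gg)).1
      (roots.foldl (bRoot (PySem.Dict.ofList g) ((g.map (fun p => p.2.length)).sum + 2))
          (vis, gg)).1 := by
  induction roots with
  | nil => intro num vis gg h; exact ⟨rfl, h⟩
  | cons v t ih =>
    intro num vis gg hNV
    simp only [List.foldl_cons]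
    by_cases hm : v ∈ vis
    · have hga : (num.getD v 0 == 0) = false := by
        rw [beq_eq_false_iff_ne]
        intro h0
        exact (hNV v).mp h0 hm
      have hgb : PySem.Set.contains vis v = true := (pv_contains_iff _ _).mpr hm
      simp only [aSub, bRoot, hga, hgb, Bool.false_eq_true, if_true, if_false]
      exact ih num vis gg hNV
    · have h0 : num.getD v 0 = 0 := (hNV v).mpr hm
      have hga : (num.getD v 0 == 0) = true := by rw [beq_iff_eq]; exact h0
      have hgb : PySem.Set.contains vis v = false := by
        rw [Bool.eq_false_iff]
        intro hc
        exact hm ((pv_contains_iff _ _).mp hc)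
      simp only [aSub, bRoot, hga, hgb, Bool.false_eq_true, if_true, if_false]
      have hNV' := pv_NV_mark num vis v 1 one_ne_zero hNV
      have hZle : Zc g (num.insert v 1) ≤ (g.map (fun p => p.2.length)).sum :=
        le_trans (pv_Zc_le g _) (pv_uL_le g)
      obtain ⟨hg, hv⟩ := pv_L2 g ((g.map (fun p => p.2.length)).sum + 2) [v] 0 (1 + 1)
        (num.insert v 1) ((PySem.Dict.empty : Dct).insert v 0) (PySem.Set.add vis v)
        ((g.map (fun p => p.2.length)).sum + 2) (by norm_num) hNV'
        (by simpa using by omega) (by omega)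
      simp only [List.map_cons, List.map_nil] at hg hv
      rw [hg]
      exact ih _ _ _ hv

lemma pv_num0_getD (ks : List String) :
    ∀ (n : Dct), (∀ u, n.getD u 0 = 0) →
      ∀ u, (ks.foldl (fun (n : Dct) v => n.insert v 0) n).getD u 0 = 0 := by
  induction ks with
  | nil => intro n hn u; exact hn u
  | cons k t ih =>
    intro n hn u
    refine ih _ (fun x => ?_) u
    rw [PySem.Dict.getD_insert]
    split
    · rfl
    · exact hn x

lemma pv_update_nodup (l : List String) :
    ∀ (s : PySem.Set String), l.Nodup → (∀ x ∈ l, x ∉ s) → PySem.Set.update s l = s ++ l := by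
  induction l with
  | nil => intro s _ _; simp [PySem.Set.update]
  | cons x t ih =>
    intro s hnd hns
    obtain ⟨hx, ht⟩ := List.nodup_cons.mp hnd
    have hcx : PySem.Set.contains s x = false := by
      rw [Bool.eq_false_iff]
      intro hc
      exact hns x List.mem_cons_self ((pv_contains_iff s x).mp hc)
    have hadd : PySem.Set.add s x = s ++ [x] := by
      unfold PySem.Set.add
      rw [hcx]; rfl
    have : PySem.Set.update s (x :: t) = PySem.Set.update (s ++ [x]) t := by
      show List.foldl PySem.Set.add s (x :: t) = _
      rw [List.foldl_cons, hadd]; rfl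
    rw [this, ih (s ++ [x]) ht ?_]
    · simp
    · intro y hy hmem
      rcases List.mem_append.mp hmem with hm | hm
      · exact hns y (List.mem_cons_of_mem _ hy) hm
      · rw [List.mem_singleton] at hm
        exact hx (hm ▸ hy)

lemma pv_num0_keys (g : List (String × List String)) :
    ((PySem.Dict.ofList g).keys.foldl (fun (n : Dct) v => n.insert v 0)
        PySem.Dict.empty).keys = (PySem.Dict.ofList g).keys := by
  have h := PySem.Dict.keys_foldl_insert (ν := Int) (PySem.Dict.ofList g).keys
    (fun _ _ => 0) PySem.Dict.empty
  rw [h]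
  have he : (PySem.Dict.empty : Dct).keys = ([] : List String) := rfl
  rw [he, pv_update_nodup _ _ (PySem.Dict.nodup_keys_ofList g) (by simp), List.nil_append]

-- ===== VERDICT (by name: the statement is the Claim_ definition above) =====
theorem search_spec : Claim_equal_search := by
  unfold Claim_equal_search
  intro g start _ _
  show search g start = search_alt g start
  simp only [search, search_alt]
  have hkeys := pv_num0_keys g
  have hNV0 : NV ((PySem.Dict.ofList g).keys.foldl (fun (n : Dct) v => n.insert v 0)
      PySem.Dict.empty) PySem.Set.empty := by
    intro u
    constructor
    · intro _ hm
      cases hm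
    · intro _
      exact pv_num0_getD _ _ (fun x => PySem.Dict.getD_empty x 0) u
  cases start with
  | none =>
    rw [hkeys]
    simp only [List.nil_append]
    exact congrArg (List.map _)
      (pv_L3 g (PySem.Dict.ofList g).keys _ PySem.Set.empty [] hNV0).1
  | some s =>
    rw [hkeys]
    simp only [List.cons_append, List.nil_append]
    have h3 := pv_L3 g (s :: (PySem.Dict.ofList g).keys) _ PySem.Set.empty [] hNV0
    simp only [List.foldl_cons] at h3
    exact congrArg (List.map _) h3.1
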